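-- pv_equiv track=rewrite | github.com/andylehti/shep32-streamlit | app.py | biasTransform
-- ===== SOURCE A (Python) =====
-- def decodeDigit(ch):
--     return ord(ch) - 48
--
-- def biasTransform(n, p):
--     state = str(n)
--     width = len(state)
--     seed = decodeDigit(state[0])
--     out = []
--     for i in range(p):
--         lane = decodeDigit(state[i % width])
--         out.append(chr(((lane + seed) % 10) + 48))
--     return "".join(out)
-- ===== SOURCE B (Python) =====
-- def biasTransform(n, p):
--     state = str(n)
--     width = len(state)
--     seed = ord(state[0]) - 48
--     period = ''.join(chr(((ord(c) - 48 + seed) % 10) + 48) for c in state)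
--     reps = (p + width - 1) // width
--     return (period * reps)[:p]
-- ===== Notes on version B (the rewrite author's own statement) =====
-- stated objective: faster
-- what changed: Instead of recomputing the shifted digit for each of the p output positions, B builds the length-width period once and produces the result by string repetition and slicing.
import Mathlib
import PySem

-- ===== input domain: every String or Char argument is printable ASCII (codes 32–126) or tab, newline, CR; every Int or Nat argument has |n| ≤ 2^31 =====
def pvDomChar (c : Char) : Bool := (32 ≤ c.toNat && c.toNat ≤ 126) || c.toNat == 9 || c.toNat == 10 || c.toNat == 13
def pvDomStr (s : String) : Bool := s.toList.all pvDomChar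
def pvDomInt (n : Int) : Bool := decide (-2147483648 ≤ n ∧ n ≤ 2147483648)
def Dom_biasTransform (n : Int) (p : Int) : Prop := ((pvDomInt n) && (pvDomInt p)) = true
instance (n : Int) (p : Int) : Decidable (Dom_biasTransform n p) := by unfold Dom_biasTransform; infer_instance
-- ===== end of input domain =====

-- B builds the length-width period once and tiles/slices it, instead of A's per-position loop over all p outputs.


-- ===== PORT A =====
-- decodeDigit(ch) = ord(ch) - 48
def pvDecode (c : Char) : Int := (c.toNat : Int) - 48

def biasTransform (n : Int) (p : Int) : String :=
  let state := PySem.Int.toChars n            -- state = str(n)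
  let width : Int := PySem.List.len state     -- width = len(state)
  -- state[0] never raises: str(n) is nonempty, so pyGetD's default is never taken
  let seed := pvDecode (PySem.List.pyGetD state 0 '0')
  let out := (PySem.List.pyRange 0 p 1).foldl
    (fun acc i =>
      -- state[i % width] is always in range (0 ≤ i, width > 0), so pyGetD is exact
      let lane := pvDecode (PySem.List.pyGetD state (PySem.Int.mod i width) '0')
      acc ++ [Char.ofNat ((PySem.Int.mod (lane + seed) 10).toNat + 48)]) []
  String.mk out

-- ===== PORT B =====
def biasTransform_alt (n : Int) (p : Int) : String :=
  let state := PySem.Int.toChars n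
  let width : Int := PySem.List.len state
  let seed := pvDecode (PySem.List.pyGetD state 0 '0')
  let period := state.map (fun c => Char.ofNat ((PySem.Int.mod (pvDecode c + seed) 10).toNat + 48))
  let reps := PySem.Int.floordiv (p + width - 1) width
  -- (period * reps)[:p]  — str * k is "" for k ≤ 0, hence reps.toNat
  String.mk (PySem.List.slice ((List.replicate reps.toNat period).flatten) none (some p))

-- ===== PRECONDITION & SPEC =====
def Spec_biasTransform (n : Int) (p : Int) (out : String) : Prop := out = biasTransform_alt n p
instance (n : Int) (p : Int) (out : String) : Decidable (Spec_biasTransform n p out) := by unfold Spec_biasTransform; infer_instance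

-- ===== CLAIM (what is proved, stated in full; the proofs are below) =====
def Claim_equal_biasTransform : Prop := ∀ (n : Int) (p : Int), Dom_biasTransform n p → Spec_biasTransform n p (biasTransform n p)

-- ===== LEMMAS AND PROOFS =====

lemma pvToDigitsCore_cons_ne_nil : ∀ (f n : Nat) (c : Char) (l : List Char),
    Nat.toDigitsCore 10 f n (c :: l) ≠ [] := by
  intro f
  induction f with
  | zero => intro n c l; simp [Nat.toDigitsCore]
  | succ f ih =>
    intro n c l
    simp only [Nat.toDigitsCore]
    split
    · simp
    · exact ih _ _ _

lemma pvToChars_ne_nil (n : Int) : PySem.Int.toChars n ≠ [] := by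
  unfold PySem.Int.toChars
  split
  · simp
  · unfold Nat.toDigits
    simp only [Nat.toDigitsCore]
    split
    · simp
    · exact pvToDigitsCore_cons_ne_nil _ _ _ _

lemma pvFoldl_append_map {α β : Type} (g : α → β) :
    ∀ (l : List α) (acc : List β),
      l.foldl (fun a i => a ++ [g i]) acc = acc ++ l.map g := by
  intro l
  induction l with
  | nil => intro acc; simp
  | cons x xs ih => intro acc; simp [ih]

lemma pvGetElem?_flatten_replicate {α : Type} (l : List α) :
    ∀ (r i : Nat), i < r * l.length →
      (List.replicate r l).flatten[i]? = l[i % l.length]? := by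
  intro r
  induction r with
  | zero => intro i h; omega
  | succ r ih =>
    intro i h
    rw [List.replicate_succ, List.flatten_cons]
    by_cases hi : i < l.length
    · rw [List.getElem?_append_left hi, Nat.mod_eq_of_lt hi]
    · rw [Nat.not_lt] at hi
      rw [List.getElem?_append_right hi, ih (i - l.length) (by
        have hsm : (r + 1) * l.length = r * l.length + l.length := by ring
        omega)]
      rw [Nat.mod_eq_sub_mod hi]

lemma pvTake_flatten_replicate {α : Type} (l : List α) (d : α) (hl : 0 < l.length)
    (r m : Nat) (h : m ≤ r * l.length) :
    (List.replicate r l).flatten.take m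
      = (List.range m).map (fun k => l.getD (k % l.length) d) := by
  apply List.ext_getElem?
  intro i
  by_cases him : i < m
  · rw [List.getElem?_take_of_lt him,
      pvGetElem?_flatten_replicate l r i (by omega),
      List.getElem?_map, List.getElem?_range him]
    have hmod : i % l.length < l.length := Nat.mod_lt _ hl
    simp [List.getD, List.getElem?_eq_getElem hmod]
  · rw [Nat.not_lt] at him
    rw [List.getElem?_eq_none_iff.2, List.getElem?_eq_none_iff.2]
    · simpa using him
    · simp
      omega

theorem pvMain (n p : Int) : biasTransform n p = biasTransform_alt n p := by
  unfold biasTransform biasTransform_alt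
  have hne := pvToChars_ne_nil n
  set state := PySem.Int.toChars n with hstate
  have hw : 0 < state.length := List.length_pos_iff.2 hne
  simp only [PySem.List.len_eq]
  set seed := pvDecode (PySem.List.pyGetD state 0 '0') with hseed
  set f : Char → Char :=
    fun c => Char.ofNat ((PySem.Int.mod (pvDecode c + seed) 10).toNat + 48) with hf
  rcases le_or_gt p 0 with hp | hp
  · -- p ≤ 0 : both sides are ""
    have hreps : (PySem.Int.floordiv (p + (state.length : Int) - 1) (state.length : Int)).toNat = 0 := by
      have hlt : PySem.Int.floordiv (p + (state.length : Int) - 1) (state.length : Int) < 1 := by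
        rw [PySem.Int.floordiv_lt_iff_lt_mul (by exact_mod_cast hw)]
        omega
      omega
    rw [hreps, PySem.List.pyRange_one_eq_nil hp]
    simp [PySem.List.slice]
  · -- p > 0
    set m := p.toNat with hm
    have hpm : p = (m : Int) := by omega
    have hreps : (m : Int) ≤ PySem.Int.floordiv (p + (state.length : Int) - 1) (state.length : Int) * (state.length : Int) := by
      have h0 := PySem.Int.floordiv_mul_add_mod (p + (state.length : Int) - 1) (state.length : Int)
      have h1 : PySem.Int.mod (p + (state.length : Int) - 1) (state.length : Int)
          = (p + (state.length : Int) - 1) % (state.length : Int) :=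
        PySem.Int.mod_eq_emod_of_pos (by exact_mod_cast hw)
      have h2 : 0 ≤ (p + (state.length : Int) - 1) % (state.length : Int) :=
        Int.emod_nonneg _ (by positivity)
      have h3 : (p + (state.length : Int) - 1) % (state.length : Int) < (state.length : Int) :=
        Int.emod_lt_of_pos _ (by exact_mod_cast hw)
      omega
    have hrnn : 0 ≤ PySem.Int.floordiv (p + (state.length : Int) - 1) (state.length : Int) := by
      nlinarith [hreps, (by exact_mod_cast hw : (0:Int) < (state.length : Int)), (by omega : (0:Int) < (m:Int))]
    set r := (PySem.Int.floordiv (p + (state.length : Int) - 1) (state.length : Int)).toNat with hr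
    have hmr : m ≤ r * state.length := by
      have : ((r * state.length : Nat) : Int) = PySem.Int.floordiv (p + (state.length : Int) - 1) (state.length : Int) * (state.length : Int) := by
        push_cast [hr, Int.toNat_of_nonneg hrnn]
        ring
      omega
    rw [hpm, PySem.List.slice_to_natCast,
      pvTake_flatten_replicate (state.map f) '0' (by simpa using hw) r m (by simpa using hmr),
      PySem.List.pyRange_one, pvFoldl_append_map]
    simp only [List.nil_append, List.map_map, Int.sub_zero, Int.toNat_natCast]
    congr 1
    apply List.map_congr_left
    intro k hk
    simp only [Function.comp]
    have hmod : k % state.length < state.length := Nat.mod_lt _ hw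
    rw [show ((0:Int) + (k:Int)) = ((k:Int)) by ring]
    rw [PySem.Int.mod_natCast k state.length, PySem.List.pyGetD_natCast,
      List.getD_eq_getElem _ _ hmod]
    simp [hf, List.getElem?_eq_getElem hmod]

-- ===== VERDICT (by name: the statement is the Claim_ definition above) =====
theorem biasTransform_spec : Claim_equal_biasTransform := by
  intro n p _
  exact pvMain n p
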